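-- pv_equiv track=rewrite | github.com/cessen/syosetu2ebook | syosetu2ebook.py | common_subs
-- ===== SOURCE A (Python) =====
-- def common_subs(text):
--     subs = [
--         ["0", "０"],
--         ["1", "１"],
--         ["2", "２"],
--         ["3", "３"],
--         ["4", "４"],
--         ["5", "５"],
--         ["6", "６"],
--         ["7", "７"],
--         ["8", "８"],
--         ["9", "９"],
--         ["&quot;", "\""],
--     ]
--     for sub in subs:
--         text = text.replace(sub[0], sub[1])
--     return text
-- ===== SOURCE B (Python) =====
-- def common_subs(text):
--     out = []
--     i = 0
--     n = len(text)
--     while i < n: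
--         if text.startswith('&quot;', i):
--             out.append('"')
--             i += 6
--         else:
--             c = text[i]
--             if '0' <= c <= '9':
--                 out.append(chr(ord(c) + 0xFEE0))
--             else:
--                 out.append(c)
--             i += 1
--     return ''.join(out)
-- ===== Notes on version B (the rewrite author's own statement) =====
-- stated objective: alternative
-- what changed: Replaced eleven sequential full-string str.replace passes by a single left-to-right scan that tests for the six-character HTML quote entity at the current position and maps digits to fullwidth arithmetically (ord(c)+0xFEE0).
import Mathlib
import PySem

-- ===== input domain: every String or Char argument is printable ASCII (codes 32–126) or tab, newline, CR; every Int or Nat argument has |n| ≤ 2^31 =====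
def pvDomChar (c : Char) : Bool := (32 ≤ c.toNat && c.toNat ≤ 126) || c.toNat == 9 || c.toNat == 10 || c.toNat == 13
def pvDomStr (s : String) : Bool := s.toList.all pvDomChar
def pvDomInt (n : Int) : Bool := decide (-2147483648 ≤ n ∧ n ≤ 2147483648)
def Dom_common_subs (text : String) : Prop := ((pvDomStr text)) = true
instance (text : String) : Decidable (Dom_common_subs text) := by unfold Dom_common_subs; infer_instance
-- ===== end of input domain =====

-- B replaces A's 11 sequential str.replace passes by a single left-to-right scan with
-- a '&quot;' prefix test and an arithmetic fullwidth-digit map (objective: alternative).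


-- ===== PORT A =====
def common_subs (text : String) : String :=
  let subs : List (String × String) :=
    [("0", "０"), ("1", "１"), ("2", "２"), ("3", "３"), ("4", "４"),
     ("5", "５"), ("6", "６"), ("7", "７"), ("8", "８"), ("9", "９"),
     ("&quot;", "\"")]
  subs.foldl (fun t sub => PySem.Str.replace t sub.1 sub.2) text

-- ===== PORT B =====
-- per-character map of Source B: fullwidth a decimal digit, leave everything else
def csAltChar (c : Char) : Char :=
  if '0' ≤ c ∧ c ≤ '9' then Char.ofNat (c.toNat + 0xFEE0) else c

-- the single left-to-right scan of Source B (startswith('&quot;', i) test, then the digit map)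
def csAltGo : List Char → List Char
  | [] => []
  | c :: t =>
    if ("&quot;".toList).isPrefixOf (c :: t) then '"' :: csAltGo (t.drop 5)
    else csAltChar c :: csAltGo t
termination_by l => l.length
decreasing_by
  all_goals simp

def common_subs_alt (text : String) : String := String.ofList (csAltGo text.toList)

-- ===== PRECONDITION & SPEC =====
def Spec_common_subs (text : String) (out : String) : Prop := out = common_subs_alt text
instance (text : String) (out : String) : Decidable (Spec_common_subs text out) := by unfold Spec_common_subs; infer_instance

-- ===== CLAIM (what is proved, stated in full; the proofs are below) =====
def Claim_equal_common_subs : Prop := ∀ (text : String), Dom_common_subs text → Spec_common_subs text (common_subs text)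

-- ===== LEMMAS AND PROOFS =====

-- proof-side helper: one single-character replacement step
def mstep (d D c : Char) : Char := if c = d then D else c

lemma char_eq_of_toNat {c d : Char} (h : c.toNat = d.toNat) : c = d :=
  Char.ext (UInt32.toNat_inj.mp h)

-- a single-character replace is a map
lemma go_single (a b : Char) : ∀ (fuel : Nat) (l acc : List Char), l.length ≤ fuel →
    PySem.Chars.replace.go [a] [b] fuel l acc = acc.reverse ++ l.map (mstep a b) := by
  intro fuel
  induction fuel with
  | zero => intro l acc h
            have : l = [] := List.eq_nil_of_length_eq_zero (Nat.le_zero.mp h)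
            subst this; simp [PySem.Chars.replace.go]
  | succ n ih =>
    intro l acc h
    cases l with
    | nil => simp [PySem.Chars.replace.go]
    | cons c t =>
      rw [PySem.Chars.replace.go]
      by_cases hc : a = c
      · subst hc
        have hpre : [a].isPrefixOf (a :: t) = true := by simp [List.isPrefixOf]
        simp only [hpre, if_pos]
        rw [ih]
        · simp [mstep]
        · simp at h ⊢; omega
      · have hpre : [a].isPrefixOf (c :: t) = false := by
          simp [List.isPrefixOf]; exact hc
        simp only [hpre, Bool.false_eq_true, if_neg, not_false_iff]
        rw [ih]
        · simp [mstep]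
          intro hh; exact absurd hh.symm hc
        · simp at h; omega

lemma replace_single (a b : Char) (l : List Char) :
    PySem.Chars.replace l [a] [b] = l.map (mstep a b) := by
  rw [PySem.Chars.replace]
  simp [go_single a b l.length l [] le_rfl]

lemma replace_map (a b : Char) (f : Char → Char) (l : List Char) :
    PySem.Chars.replace (l.map f) [a] [b] = l.map (fun c => mstep a b (f c)) := by
  rw [replace_single, List.map_map]
  rfl

-- the ten digit replacement steps compose to csAltChar
lemma comp_eq (c : Char) :
    mstep '9' '９' (mstep '8' '８' (mstep '7' '７' (mstep '6' '６' (mstep '5' '５'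
      (mstep '4' '４' (mstep '3' '３' (mstep '2' '２' (mstep '1' '１'
      (mstep '0' '０' c))))))))) = csAltChar c := by
  by_cases h0 : c = '0'; · subst h0; decide
  by_cases h1 : c = '1'; · subst h1; decide
  by_cases h2 : c = '2'; · subst h2; decide
  by_cases h3 : c = '3'; · subst h3; decide
  by_cases h4 : c = '4'; · subst h4; decide
  by_cases h5 : c = '5'; · subst h5; decide
  by_cases h6 : c = '6'; · subst h6; decide
  by_cases h7 : c = '7'; · subst h7; decide
  by_cases h8 : c = '8'; · subst h8; decide
  by_cases h9 : c = '9'; · subst h9; decide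
  have hnd : ¬ ('0' ≤ c ∧ c ≤ '9') := by
    rintro ⟨hl, hr⟩
    have hl' : 48 ≤ c.toNat := hl
    have hr' : c.toNat ≤ 57 := hr
    have n0 : c.toNat ≠ 48 := fun hn => h0 (char_eq_of_toNat (hn.trans rfl))
    have n1 : c.toNat ≠ 49 := fun hn => h1 (char_eq_of_toNat (hn.trans rfl))
    have n2 : c.toNat ≠ 50 := fun hn => h2 (char_eq_of_toNat (hn.trans rfl))
    have n3 : c.toNat ≠ 51 := fun hn => h3 (char_eq_of_toNat (hn.trans rfl))
    have n4 : c.toNat ≠ 52 := fun hn => h4 (char_eq_of_toNat (hn.trans rfl))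
    have n5 : c.toNat ≠ 53 := fun hn => h5 (char_eq_of_toNat (hn.trans rfl))
    have n6 : c.toNat ≠ 54 := fun hn => h6 (char_eq_of_toNat (hn.trans rfl))
    have n7 : c.toNat ≠ 55 := fun hn => h7 (char_eq_of_toNat (hn.trans rfl))
    have n8 : c.toNat ≠ 56 := fun hn => h8 (char_eq_of_toNat (hn.trans rfl))
    have n9 : c.toNat ≠ 57 := fun hn => h9 (char_eq_of_toNat (hn.trans rfl))
    omega
  simp [mstep, csAltChar, h0, h1, h2, h3, h4, h5, h6, h7, h8, h9, hnd]

-- csAltChar fixes every character that is not a decimal digit and is below U+FF10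
lemma csAltChar_fix (a : Char) (h1 : a.toNat < 65296)
    (h2 : ¬ (48 ≤ a.toNat ∧ a.toNat ≤ 57)) (x : Char) :
    csAltChar x = a ↔ x = a := by
  unfold csAltChar
  by_cases hd : '0' ≤ x ∧ x ≤ '9'
  · have hl : 48 ≤ x.toNat := hd.1
    have hr : x.toNat ≤ 57 := hd.2
    have hv : (x.toNat + 0xFEE0).isValidChar := by unfold Nat.isValidChar; omega
    have ht : (Char.ofNat (x.toNat + 0xFEE0)).toNat = x.toNat + 0xFEE0 := by
      simp [Char.ofNat, hv]
    rw [if_pos hd]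
    constructor
    · intro he
      exfalso
      have := congrArg Char.toNat he
      rw [ht] at this
      omega
    · intro he; exfalso; subst he; omega
  · rw [if_neg hd]

lemma prefix_map (q : List Char) (hq : ∀ a ∈ q, ∀ x, csAltChar x = a ↔ x = a) :
    ∀ l : List Char, q.isPrefixOf (l.map csAltChar) = q.isPrefixOf l := by
  induction q with
  | nil => intro l; simp [List.isPrefixOf]
  | cons a q' ih =>
    intro l
    cases l with
    | nil => simp [List.isPrefixOf]
    | cons x t =>
      simp only [List.map_cons, List.isPrefixOf]
      have hax : (a == csAltChar x) = (a == x) := by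
        by_cases h : x = a
        · subst h
          have hcx : csAltChar x = x := (hq x (by simp) x).mpr rfl
          simp [hcx]
        · have hcx : ¬ csAltChar x = a := fun hc => h ((hq a (by simp) x).mp hc)
          rw [Bool.eq_iff_iff]
          simp only [beq_iff_eq]
          constructor
          · intro hh; exact absurd hh.symm hcx
          · intro hh; exact absurd hh.symm h
      rw [hax, ih (fun b hb x => hq b (by simp [hb]) x)]

lemma hq_quot : ∀ a ∈ "&quot;".toList, ∀ x, csAltChar x = a ↔ x = a := by
  have he : "&quot;".toList = ['&','q','u','o','t',';'] := rfl
  rw [he]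
  intro a ha x
  fin_cases ha <;> exact csAltChar_fix _ (by decide) (by decide) x

-- the '&quot;' replace applied after the digit map is exactly Source B's single scan
lemma go_quot : ∀ (fuel : Nat) (l acc : List Char), l.length ≤ fuel →
    PySem.Chars.replace.go "&quot;".toList ['"'] fuel (l.map csAltChar) acc
      = acc.reverse ++ csAltGo l := by
  intro fuel
  induction fuel with
  | zero =>
    intro l acc h
    have : l = [] := List.eq_nil_of_length_eq_zero (Nat.le_zero.mp h)
    subst this
    simp [PySem.Chars.replace.go, csAltGo]
  | succ n ih =>
    intro l acc h
    cases l with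
    | nil => simp [PySem.Chars.replace.go, csAltGo]
    | cons c t =>
      have hcond : (("&quot;".toList).isPrefixOf (csAltChar c :: List.map csAltChar t))
          = (("&quot;".toList).isPrefixOf (c :: t)) := by
        have := prefix_map _ hq_quot (c :: t)
        simpa using this
      rw [List.map_cons, PySem.Chars.replace.go, hcond]
      by_cases hp : ("&quot;".toList).isPrefixOf (c :: t)
      · simp only [hp, if_pos]
        have hdrop : List.drop ("&quot;".toList).length (csAltChar c :: List.map csAltChar t)
            = List.map csAltChar (t.drop 5) := by
          simp [List.map_drop]
        rw [hdrop, ih _ _ (by simp at h ⊢; omega)]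
        have hgo : csAltGo (c :: t) = '"' :: csAltGo (t.drop 5) := by
          rw [csAltGo, if_pos hp]
        rw [hgo]; simp
      · simp only [hp, Bool.false_eq_true, if_neg, not_false_iff]
        rw [ih _ _ (by simp at h ⊢; omega)]
        have hgo : csAltGo (c :: t) = csAltChar c :: csAltGo t := by
          rw [csAltGo, if_neg hp]
        rw [hgo]; simp

-- ===== VERDICT (by name: the statement is the Claim_ definition above) =====
theorem common_subs_spec : Claim_equal_common_subs := by
  intro text _
  unfold Spec_common_subs
  apply String.toList_inj.mp
  unfold common_subs
  simp only [List.foldl_cons, List.foldl_nil]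
  have t0 : ("0" : String).toList = ['0'] := by decide
  have u0 : ("０" : String).toList = ['０'] := by decide
  have t1 : ("1" : String).toList = ['1'] := by decide
  have u1 : ("１" : String).toList = ['１'] := by decide
  have t2 : ("2" : String).toList = ['2'] := by decide
  have u2 : ("２" : String).toList = ['２'] := by decide
  have t3 : ("3" : String).toList = ['3'] := by decide
  have u3 : ("３" : String).toList = ['３'] := by decide
  have t4 : ("4" : String).toList = ['4'] := by decide
  have u4 : ("４" : String).toList = ['４'] := by decide
  have t5 : ("5" : String).toList = ['5'] := by decide
  have u5 : ("５" : String).toList = ['５'] := by decide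
  have t6 : ("6" : String).toList = ['6'] := by decide
  have u6 : ("６" : String).toList = ['６'] := by decide
  have t7 : ("7" : String).toList = ['7'] := by decide
  have u7 : ("７" : String).toList = ['７'] := by decide
  have t8 : ("8" : String).toList = ['8'] := by decide
  have u8 : ("８" : String).toList = ['８'] := by decide
  have t9 : ("9" : String).toList = ['9'] := by decide
  have u9 : ("９" : String).toList = ['９'] := by decide
  have s0 : ((PySem.Str.replace text "0" "０")).toList = List.map (fun c => (mstep '0' '０' c)) text.toList := by
    rw [PySem.Str.toList_replace, t0, u0, replace_single]
  have s1 : ((PySem.Str.replace (PySem.Str.replace text "0" "０") "1" "１")).toList = List.map (fun c => (mstep '1' '１' (mstep '0' '０' c))) text.toList := by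
    rw [PySem.Str.toList_replace, t1, u1, s0, replace_map]
  have s2 : ((PySem.Str.replace (PySem.Str.replace (PySem.Str.replace text "0" "０") "1" "１") "2" "２")).toList = List.map (fun c => (mstep '2' '２' (mstep '1' '１' (mstep '0' '０' c)))) text.toList := by
    rw [PySem.Str.toList_replace, t2, u2, s1, replace_map]
  have s3 : ((PySem.Str.replace (PySem.Str.replace (PySem.Str.replace (PySem.Str.replace text "0" "０") "1" "１") "2" "２") "3" "３")).toList = List.map (fun c => (mstep '3' '３' (mstep '2' '２' (mstep '1' '１' (mstep '0' '０' c))))) text.toList := by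
    rw [PySem.Str.toList_replace, t3, u3, s2, replace_map]
  have s4 : ((PySem.Str.replace (PySem.Str.replace (PySem.Str.replace (PySem.Str.replace (PySem.Str.replace text "0" "０") "1" "１") "2" "２") "3" "３") "4" "４")).toList = List.map (fun c => (mstep '4' '４' (mstep '3' '３' (mstep '2' '２' (mstep '1' '１' (mstep '0' '０' c)))))) text.toList := by
    rw [PySem.Str.toList_replace, t4, u4, s3, replace_map]
  have s5 : ((PySem.Str.replace (PySem.Str.replace (PySem.Str.replace (PySem.Str.replace (PySem.Str.replace (PySem.Str.replace text "0" "０") "1" "１") "2" "２") "3" "３") "4" "４") "5" "５")).toList = List.map (fun c => (mstep '5' '５' (mstep '4' '４' (mstep '3' '３' (mstep '2' '２' (mstep '1' '１' (mstep '0' '０' c))))))) text.toList := by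
    rw [PySem.Str.toList_replace, t5, u5, s4, replace_map]
  have s6 : ((PySem.Str.replace (PySem.Str.replace (PySem.Str.replace (PySem.Str.replace (PySem.Str.replace (PySem.Str.replace (PySem.Str.replace text "0" "０") "1" "１") "2" "２") "3" "３") "4" "４") "5" "５") "6" "６")).toList = List.map (fun c => (mstep '6' '６' (mstep '5' '５' (mstep '4' '４' (mstep '3' '３' (mstep '2' '２' (mstep '1' '１' (mstep '0' '０' c)))))))) text.toList := by
    rw [PySem.Str.toList_replace, t6, u6, s5, replace_map]
  have s7 : ((PySem.Str.replace (PySem.Str.replace (PySem.Str.replace (PySem.Str.replace (PySem.Str.replace (PySem.Str.replace (PySem.Str.replace (PySem.Str.replace text "0" "０") "1" "１") "2" "２") "3" "３") "4" "４") "5" "５") "6" "６") "7" "７")).toList = List.map (fun c => (mstep '7' '７' (mstep '6' '６' (mstep '5' '５' (mstep '4' '４' (mstep '3' '３' (mstep '2' '２' (mstep '1' '１' (mstep '0' '０' c))))))))) text.toList := by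
    rw [PySem.Str.toList_replace, t7, u7, s6, replace_map]
  have s8 : ((PySem.Str.replace (PySem.Str.replace (PySem.Str.replace (PySem.Str.replace (PySem.Str.replace (PySem.Str.replace (PySem.Str.replace (PySem.Str.replace (PySem.Str.replace text "0" "０") "1" "１") "2" "２") "3" "３") "4" "４") "5" "５") "6" "６") "7" "７") "8" "８")).toList = List.map (fun c => (mstep '8' '８' (mstep '7' '７' (mstep '6' '６' (mstep '5' '５' (mstep '4' '４' (mstep '3' '３' (mstep '2' '２' (mstep '1' '１' (mstep '0' '０' c)))))))))) text.toList := by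
    rw [PySem.Str.toList_replace, t8, u8, s7, replace_map]
  have s9 : ((PySem.Str.replace (PySem.Str.replace (PySem.Str.replace (PySem.Str.replace (PySem.Str.replace (PySem.Str.replace (PySem.Str.replace (PySem.Str.replace (PySem.Str.replace (PySem.Str.replace text "0" "０") "1" "１") "2" "２") "3" "３") "4" "４") "5" "５") "6" "６") "7" "７") "8" "８") "9" "９")).toList = List.map (fun c => (mstep '9' '９' (mstep '8' '８' (mstep '7' '７' (mstep '6' '６' (mstep '5' '５' (mstep '4' '４' (mstep '3' '３' (mstep '2' '２' (mstep '1' '１' (mstep '0' '０' c))))))))))) text.toList := by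
    rw [PySem.Str.toList_replace, t9, u9, s8, replace_map]
  have hmap : List.map (fun c => (mstep '9' '９' (mstep '8' '８' (mstep '7' '７' (mstep '6' '６' (mstep '5' '５' (mstep '4' '４' (mstep '3' '３' (mstep '2' '２' (mstep '1' '１' (mstep '0' '０' c))))))))))) text.toList = List.map csAltChar text.toList :=
    List.map_congr_left (fun c _ => comp_eq c)
  rw [PySem.Str.toList_replace, s9, hmap]
  have tQ : ("\"" : String).toList = ['"'] := by decide
  rw [tQ, PySem.Chars.replace, if_neg (by decide)]
  rw [go_quot (List.map csAltChar text.toList).length text.toList [] (by simp)]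
  simp [common_subs_alt]
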